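-- pv_equiv track=rewrite | github.com/syamkarni-bounteous/coding_assessment_25-05 | 6.py | funn
-- ===== SOURCE A (Python) =====
-- from collections import Counter
--
-- def funn(s,t):
--     n,m = len(s),len(t)
--     if m>n:
--         return False
--     t_count = Counter(t)
--     wcnt = Counter(s[:m])
--
--
--
--     if wcnt==t_count:
--         return True
--
--     for i in range(m, n):
--         wcnt[s[i]] +=1
--         wcnt[s[i-m]]-=1
--         if wcnt[s[i-m]]==0:
--             del wcnt[s[i-m]]
--         if wcnt==t_count:
--             return True
--     return False
-- ===== SOURCE B (Python) =====
-- def funn(s, t):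
--     m = len(t)
--     target = sorted(t)
--     return any(sorted(s[i:i+m]) == target for i in range(len(s) - m + 1))
-- ===== Notes on version B (the rewrite author's own statement) =====
-- stated objective: simpler
-- what changed: A maintains an incrementally updated Counter over a sliding window and compares dicts at every step; B simply checks each window directly, comparing sorted(s[i:i+m]) with sorted(t) in a one-line any(...).
import Mathlib
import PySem

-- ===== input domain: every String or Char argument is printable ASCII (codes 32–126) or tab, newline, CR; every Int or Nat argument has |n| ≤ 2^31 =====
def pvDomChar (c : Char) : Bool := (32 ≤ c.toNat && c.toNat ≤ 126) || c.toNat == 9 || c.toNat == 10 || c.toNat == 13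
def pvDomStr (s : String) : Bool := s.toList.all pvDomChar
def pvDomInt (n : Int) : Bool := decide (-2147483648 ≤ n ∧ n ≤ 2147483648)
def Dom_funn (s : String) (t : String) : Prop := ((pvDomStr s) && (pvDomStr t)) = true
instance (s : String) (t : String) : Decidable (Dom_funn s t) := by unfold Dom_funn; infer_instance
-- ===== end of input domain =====

-- B replaces A's incrementally-maintained Counter sliding window by a direct per-window
-- comparison of sorted characters with sorted(t) — shorter and plainer, the same task done
-- the way an experienced Python developer would write it; no speed claim.


-- ===== PORT A =====
-- Python's dict/Counter '==' (order-insensitive; neither operand ever stores a 0 here):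
-- same key set, same value at every key.
def pyDictEq (a b : PySem.Dict Char Int) : Bool :=
  (a.keys.all (fun k => b.get? k == a.get? k)) && (b.keys.all (fun k => a.get? k == b.get? k))

-- the 'for i in range(m, n)' loop of A, with its early 'return True'
def funnLoop (sL : List Char) (tc : PySem.Dict Char Int) (m : Nat) :
    PySem.Dict Char Int → List Int → Bool
  | _, [] => false
  | wc, i :: rest =>
      let a := PySem.List.pyGetD sL i ' '                 -- s[i]   (always in range here)
      let b := PySem.List.pyGetD sL (i - (m : Int)) ' '   -- s[i-m] (always in range here)
      let wc1 := wc.modify a 0 (· + 1)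
      let wc2 := wc1.modify b 0 (· - 1)
      let wc3 := if wc2.getD b 0 == 0 then wc2.erase b else wc2
      if pyDictEq wc3 tc then true else funnLoop sL tc m wc3 rest

def funn (s : String) (t : String) : Bool :=
  let sL := s.toList
  let tL := t.toList
  let n := sL.length
  let m := tL.length
  if m > n then false
  else
    let tc := PySem.Dict.counter tL
    let wc := PySem.Dict.counter (PySem.List.slice sL none (some (m : Int)))
    if pyDictEq wc tc then true
    else funnLoop sL tc m wc (PySem.List.pyRange (m : Int) (n : Int))

-- ===== PORT B =====
def funn_alt (s : String) (t : String) : Bool :=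
  let m := t.toList.length
  let target := PySem.List.sorted t.toList (fun c => c) false
  (PySem.List.pyRange 0 ((s.toList.length : Int) - (m : Int) + 1)).any
    (fun i =>
      PySem.List.sorted (PySem.List.slice s.toList (some i) (some (i + (m : Int)))) (fun c => c) false
        == target)

-- ===== PRECONDITION & SPEC =====
def Spec_funn (s : String) (t : String) (out : Bool) : Prop := out = funn_alt s t
instance (s : String) (t : String) (out : Bool) : Decidable (Spec_funn s t out) := by unfold Spec_funn; infer_instance

-- ===== CLAIM (what is proved, stated in full; the proofs are below) =====
def Claim_equal_funn : Prop := ∀ (s : String) (t : String), Dom_funn s t → Spec_funn s t (funn s t)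

-- ===== LEMMAS AND PROOFS =====

theorem dict_get?_erase (d : PySem.Dict Char Int) (k x : Char) :
    (d.erase k).get? x = if x = k then none else d.get? x := by
  obtain ⟨items⟩ := d
  induction items with
  | nil => simp [PySem.Dict.erase, PySem.Dict.get?]
  | cons p rest ih =>
    simp only [PySem.Dict.erase, PySem.Dict.get?, List.filter_cons] at *
    by_cases hpk : p.1 = k
    · simp [hpk]
      split_ifs with hxk
      · simpa [hxk] using ih
      · have : (p.1 == x) = false := by simp [hpk]; intro h; exact hxk (h ▸ rfl)
        simp [this]
        simpa [hxk] using ih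
    · simp [hpk, List.find?_cons]
      by_cases hpx : p.1 = x
      · simp [hpx]
        intro h
        exact hpk (by rw [hpx, h])
      · have h1 : (p.1 == x) = false := by simp [hpx]
        simp [h1]
        simpa using ih

theorem mem_keys_iff_isSome (d : PySem.Dict Char Int) (k : Char) :
    k ∈ d.keys ↔ (d.get? k).isSome := by
  rw [← PySem.Dict.contains_iff_mem_keys, PySem.Dict.contains_eq_isSome_get?]

theorem pyDictEq_eq_true_iff (a b : PySem.Dict Char Int) :
    pyDictEq a b = true ↔ ∀ c, a.get? c = b.get? c := by
  simp only [pyDictEq, Bool.and_eq_true, List.all_eq_true, beq_iff_eq]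
  constructor
  · rintro ⟨h1, h2⟩ c
    by_cases ha : (a.get? c).isSome
    · exact (h1 c ((mem_keys_iff_isSome a c).2 ha)).symm
    · by_cases hb : (b.get? c).isSome
      · exact (h2 c ((mem_keys_iff_isSome b c).2 hb))
      · rw [Option.not_isSome_iff_eq_none] at ha hb; rw [ha, hb]
  · intro h
    exact ⟨fun c _ => (h c).symm, fun c _ => h c⟩

theorem pyDictEq_congr_left (a a' t : PySem.Dict Char Int)
    (h : ∀ c, a.get? c = a'.get? c) : pyDictEq a t = pyDictEq a' t := by
  rw [Bool.eq_iff_iff, pyDictEq_eq_true_iff, pyDictEq_eq_true_iff]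
  constructor <;> intro hh c
  · rw [← h c]; exact hh c
  · rw [h c]; exact hh c

theorem get?_counter (x : List Char) (c : Char) :
    (PySem.Dict.counter x).get? c
      = if x.count c = 0 then none else some ((x.count c : Nat) : Int) := by
  by_cases hc : c ∈ x
  · have hcont : (PySem.Dict.counter x).contains c = true := by
      rw [PySem.Dict.contains_counter]; simpa using hc
    have hne : (PySem.Dict.counter x).get? c ≠ none := by
      intro h; rw [PySem.Dict.get?_eq_none_iff_contains] at h; rw [hcont] at h; cases h
    obtain ⟨v, hv⟩ := Option.ne_none_iff_exists'.1 hne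
    have hval : v = ((x.count c : Nat) : Int) := by
      have := PySem.Dict.getD_counter x c
      rw [PySem.Dict.getD_eq_get?_getD, hv] at this
      simpa using this
    rw [hv, hval, if_neg (by have := List.count_pos_iff.2 hc; omega)]
  · have : (PySem.Dict.counter x).get? c = none := by
      rw [PySem.Dict.get?_eq_none_iff_contains, PySem.Dict.contains_counter]
      simpa using hc
    rw [this, if_pos (by simp [List.count_eq_zero]; exact hc)]

theorem pyDictEq_counter_iff (x y : List Char) :
    pyDictEq (PySem.Dict.counter x) (PySem.Dict.counter y) = true ↔ x.Perm y := by
  rw [pyDictEq_eq_true_iff, List.perm_iff_count]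
  constructor
  · intro h c
    have := h c
    rw [get?_counter, get?_counter] at this
    by_cases h1 : List.count c x = 0
    · by_cases h2 : List.count c y = 0
      · omega
      · rw [if_pos h1, if_neg h2] at this; exact absurd this (by simp)
    · by_cases h2 : List.count c y = 0
      · rw [if_neg h1, if_pos h2] at this; exact absurd this (by simp)
      · rw [if_neg h1, if_neg h2] at this
        exact_mod_cast Option.some.inj this
  · intro h c
    rw [get?_counter, get?_counter, h c]

-- one iteration of A's loop preserves the 'wc is the Counter of the current window' map view
theorem step_get? (wc : PySem.Dict Char Int) (v : List Char) (a b : Char)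
    (h : ∀ c, wc.get? c = (PySem.Dict.counter (b :: v)).get? c) (c : Char) :
    ((if ((wc.modify a 0 (· + 1)).modify b 0 (· - 1)).getD b 0 == 0
      then ((wc.modify a 0 (· + 1)).modify b 0 (· - 1)).erase b
      else (wc.modify a 0 (· + 1)).modify b 0 (· - 1)).get? c)
      = (PySem.Dict.counter (v ++ [a])).get? c := by
  have hget : ∀ c, wc.get? c
      = if (b :: v).count c = 0 then none else some (((b :: v).count c : Nat) : Int) := by
    intro c; rw [h c, get?_counter]
  have hgetD : wc.getD a 0 = (((b :: v).count a : Nat) : Int) := by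
    rw [PySem.Dict.getD_eq_get?_getD, hget a]
    split_ifs with h0
    · simp [h0]
    · simp
  have hN1 : ∀ c, ((b :: v) ++ [a]).count c = (b :: v).count c + (if c = a then 1 else 0) := by
    intro c
    have hs : List.count c [a] = if c = a then 1 else 0 := by
      by_cases hca : c = a
      · simp [hca]
      · rw [if_neg hca]
        exact List.count_eq_zero.2 (by simp [hca])
    rw [List.count_append, hs]
  have hw1 : ∀ c, (wc.modify a 0 (· + 1)).get? c
      = if ((b :: v) ++ [a]).count c = 0 then none
        else some ((((b :: v) ++ [a]).count c : Nat) : Int) := by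
    intro c
    rw [PySem.Dict.modify, PySem.Dict.get?_insert, hgetD, hN1 c]
    by_cases hca : c = a
    · subst hca
      rw [if_pos rfl, if_pos rfl, if_neg (show ¬((b :: v).count c + 1 = 0) from by omega)]
      push_cast
      ring_nf
    · rw [if_neg hca, if_neg hca, hget c]
      simp
  have hNb : 1 ≤ ((b :: v) ++ [a]).count b := by
    have : b ∈ (b :: v) ++ [a] := by simp
    simpa using List.count_pos_iff.2 this
  have hgD1 : (wc.modify a 0 (· + 1)).getD b 0 = ((((b :: v) ++ [a]).count b : Nat) : Int) := by
    rw [PySem.Dict.getD_eq_get?_getD, hw1 b, if_neg (by omega)]; simp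
  have hw2 : ∀ c, ((wc.modify a 0 (· + 1)).modify b 0 (· - 1)).get? c
      = if c = b then some (((((b :: v) ++ [a]).count b : Nat) : Int) - 1)
        else (wc.modify a 0 (· + 1)).get? c := by
    intro c
    conv_lhs => rw [PySem.Dict.modify, PySem.Dict.get?_insert, hgD1]
  have hgD2 : ((wc.modify a 0 (· + 1)).modify b 0 (· - 1)).getD b 0
      = ((((b :: v) ++ [a]).count b : Nat) : Int) - 1 := by
    rw [PySem.Dict.getD_eq_get?_getD, hw2 b, if_pos rfl]; simp
  have hM : ∀ c, (v ++ [a]).count c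
      = ((b :: v) ++ [a]).count c - (if c = b then 1 else 0) := by
    intro c
    by_cases hcb : c = b
    · subst hcb
      rw [if_pos rfl]
      simp [List.count_cons, List.count_append]
    · rw [if_neg hcb]
      simp [List.count_cons, List.count_append, hcb, Ne.symm hcb]
  rw [get?_counter]
  by_cases h1 : ((b :: v) ++ [a]).count b = 1
  · have hcond : (((wc.modify a 0 (· + 1)).modify b 0 (· - 1)).getD b 0 == 0) = true := by
      rw [hgD2, h1]; simp
    rw [if_pos hcond, dict_get?_erase]
    by_cases hcb : c = b
    · rw [if_pos hcb, if_pos (show ((v ++ [a]).count c = 0) from by rw [hM c, if_pos hcb, hcb, h1])]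
    · rw [if_neg hcb, hw2 c, if_neg hcb, hw1 c, hM c, if_neg hcb]
      simp
  · have hcond : (((wc.modify a 0 (· + 1)).modify b 0 (· - 1)).getD b 0 == 0) = false := by
      rw [hgD2]
      rw [beq_eq_false_iff_ne]
      intro hcontra
      omega
    rw [if_neg (by rw [hcond]; exact Bool.false_ne_true), hw2 c]
    by_cases hcb : c = b
    · rw [if_pos hcb, hcb]
      have hMb : (v ++ [a]).count b = ((b :: v) ++ [a]).count b - 1 := by
        rw [hM b, if_pos rfl]
      rw [hMb, if_neg (show ¬(((b :: v) ++ [a]).count b - 1 = 0) from by omega)]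
      rw [Nat.cast_sub hNb]
      simp
    · rw [if_neg hcb, hw1 c, hM c, if_neg hcb]
      simp

theorem window_cons (l : List Char) (j m : Nat) (hm : 1 ≤ m) (hj : j < l.length) :
    (l.drop j).take m = l[j] :: (l.drop (j + 1)).take (m - 1) := by
  obtain ⟨m', rfl⟩ : ∃ m', m = m' + 1 := ⟨m - 1, by omega⟩
  rw [List.drop_eq_getElem_cons hj, List.take_succ_cons]
  simp

theorem window_snoc (l : List Char) (j m : Nat) (hm : 1 ≤ m) (hj : j + m < l.length) :
    (l.drop (j + 1)).take m = (l.drop (j + 1)).take (m - 1) ++ [l[j + m]'hj] := by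
  obtain ⟨m', rfl⟩ : ∃ m', m = m' + 1 := ⟨m - 1, by omega⟩
  rw [List.take_succ]
  simp only [Nat.add_sub_cancel]
  congr 1
  rw [List.getElem?_drop, show j + 1 + m' = j + (m' + 1) from by omega,
    List.getElem?_eq_getElem hj]
  rfl

-- A's loop, starting after window j, decides 'some later window is a permutation of t'
theorem loop_eq (sL tL : List Char) (m : Nat) (hmlen : m = tL.length) (hm : 1 ≤ m) :
    ∀ (d j : Nat) (wc : PySem.Dict Char Int),
      sL.length - (j + m) = d →
      j + m ≤ sL.length →
      (∀ c, wc.get? c = (PySem.Dict.counter ((sL.drop j).take m)).get? c) →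
      (funnLoop sL (PySem.Dict.counter tL) m wc
          (PySem.List.pyRange ((j + m : Nat) : Int) ((sL.length : Nat) : Int)) = true
        ↔ ∃ k, j < k ∧ k + m ≤ sL.length ∧ ((sL.drop k).take m).Perm tL) := by
  intro d
  induction d with
  | zero =>
    intro j wc hd hle _
    rw [PySem.List.pyRange_one_eq_nil (by exact_mod_cast (by omega : sL.length ≤ j + m))]
    simp only [funnLoop]
    constructor
    · intro h; cases h
    · rintro ⟨k, hk1, hk2, _⟩
      omega
  | succ d ih =>
    intro j wc hd hle hinv
    have hlt : j + m < sL.length := by omega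
    rw [PySem.List.pyRange_one_cons (by exact_mod_cast hlt)]
    simp only [funnLoop]
    have hA : PySem.List.pyGetD sL ((j + m : Nat) : Int) ' ' = sL[j + m]'hlt := by
      rw [PySem.List.pyGetD_natCast, List.getD_eq_getElem?_getD, List.getElem?_eq_getElem hlt]
      rfl
    have hjlt : j < sL.length := by omega
    have hB : PySem.List.pyGetD sL (((j + m : Nat) : Int) - (m : Int)) ' ' = sL[j]'hjlt := by
      rw [show ((j + m : Nat) : Int) - (m : Int) = ((j : Nat) : Int) from by push_cast; ring,
        PySem.List.pyGetD_natCast, List.getD_eq_getElem?_getD, List.getElem?_eq_getElem hjlt]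
      rfl
    rw [hA, hB]
    have hwin := window_cons sL j m hm hjlt
    have hnext := window_snoc sL j m hm hlt
    have hinvcons : ∀ c, wc.get? c
        = (PySem.Dict.counter (sL[j]'hjlt :: (sL.drop (j + 1)).take (m - 1))).get? c := by
      intro c
      rw [← hwin]
      exact hinv c
    have hinv' : ∀ c,
        ((if ((wc.modify (sL[j + m]'hlt) 0 (· + 1)).modify (sL[j]'hjlt) 0 (· - 1)).getD (sL[j]'hjlt) 0 == 0
          then ((wc.modify (sL[j + m]'hlt) 0 (· + 1)).modify (sL[j]'hjlt) 0 (· - 1)).erase (sL[j]'hjlt)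
          else (wc.modify (sL[j + m]'hlt) 0 (· + 1)).modify (sL[j]'hjlt) 0 (· - 1))).get? c
          = (PySem.Dict.counter ((sL.drop (j + 1)).take m)).get? c := by
      intro c
      rw [hnext]
      exact step_get? wc _ _ _ hinvcons c
    set wc3 := (if ((wc.modify (sL[j + m]'hlt) 0 (· + 1)).modify (sL[j]'hjlt) 0 (· - 1)).getD (sL[j]'hjlt) 0 == 0
          then ((wc.modify (sL[j + m]'hlt) 0 (· + 1)).modify (sL[j]'hjlt) 0 (· - 1)).erase (sL[j]'hjlt)
          else (wc.modify (sL[j + m]'hlt) 0 (· + 1)).modify (sL[j]'hjlt) 0 (· - 1)) with hwc3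
    have hEq := pyDictEq_congr_left wc3 (PySem.Dict.counter ((sL.drop (j + 1)).take m))
      (PySem.Dict.counter tL) hinv'
    by_cases hperm : ((sL.drop (j + 1)).take m).Perm tL
    · have hT : pyDictEq wc3 (PySem.Dict.counter tL) = true := by
        rw [hEq]; exact (pyDictEq_counter_iff _ _).2 hperm
      rw [if_pos hT]
      simp only [true_iff]
      exact ⟨j + 1, by omega, by omega, hperm⟩
    · have hF : pyDictEq wc3 (PySem.Dict.counter tL) = false := by
        rw [hEq]
        cases hcase : pyDictEq (PySem.Dict.counter ((sL.drop (j + 1)).take m)) (PySem.Dict.counter tL)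
        · rfl
        · exact absurd ((pyDictEq_counter_iff _ _).1 hcase) hperm
      rw [if_neg (by rw [hF]; exact Bool.false_ne_true)]
      rw [show ((j + m : Nat) : Int) + 1 = (((j + 1) + m : Nat) : Int) from by push_cast; ring]
      rw [ih (j + 1) _ (by omega) (by omega) hinv']
      constructor
      · rintro ⟨k, hk1, hk2, hk3⟩; exact ⟨k, by omega, hk2, hk3⟩
      · rintro ⟨k, hk1, hk2, hk3⟩
        refine ⟨k, ?_, hk2, hk3⟩
        rcases Nat.lt_or_ge (j + 1) k with hx | hx
        · exact hx
        · have hkj : k = j + 1 := by omega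
          exact absurd (hkj ▸ hk3) hperm

theorem alt_eq (s t : String) :
    funn_alt s t = true ↔ ∃ k : Nat, k + t.toList.length ≤ s.toList.length
      ∧ ((s.toList.drop k).take t.toList.length).Perm t.toList := by
  simp only [funn_alt]
  rw [List.any_eq_true]
  constructor
  · rintro ⟨i, hi, hp⟩
    rw [PySem.List.mem_pyRange_one] at hi
    obtain ⟨hi0, hilt⟩ := hi
    refine ⟨i.toNat, by omega, ?_⟩
    rw [beq_iff_eq] at hp
    rw [show i = ((i.toNat : Nat) : Int) from by omega, PySem.List.slice_natCast_add] at hp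
    exact (PySem.List.sorted_id_eq_sorted_id_iff_perm _ _).1 hp
  · rintro ⟨k, hk, hp⟩
    refine ⟨(k : Int), ?_, ?_⟩
    · rw [PySem.List.mem_pyRange_one]
      exact ⟨by omega, by omega⟩
    · rw [beq_iff_eq, PySem.List.slice_natCast_add]
      exact (PySem.List.sorted_id_eq_sorted_id_iff_perm _ _).2 hp

-- ===== VERDICT (by name: the statement is the Claim_ definition above) =====
theorem funn_spec : Claim_equal_funn := by
  unfold Claim_equal_funn Spec_funn
  intro s t _
  simp only [funn]
  by_cases hmn : t.toList.length > s.toList.length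
  · rw [if_pos hmn, Bool.eq_iff_iff, alt_eq]
    constructor
    · intro h; cases h
    · rintro ⟨k, hk, _⟩
      omega
  · rw [if_neg hmn]
    push_neg at hmn
    have hslice : PySem.List.slice s.toList none (some ((t.toList.length : Nat) : Int))
        = (s.toList.drop 0).take t.toList.length := by
      rw [PySem.List.slice_to_natCast]
      simp
    by_cases hperm0 : ((s.toList.drop 0).take t.toList.length).Perm t.toList
    · rw [if_pos (by rw [hslice]; exact (pyDictEq_counter_iff _ _).2 hperm0)]
      rw [Bool.eq_iff_iff, alt_eq]
      simp only [true_iff]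
      exact ⟨0, by omega, hperm0⟩
    · have hF : pyDictEq
          (PySem.Dict.counter (PySem.List.slice s.toList none (some ((t.toList.length : Nat) : Int))))
          (PySem.Dict.counter t.toList) = false := by
        rw [hslice]
        cases hcase : pyDictEq (PySem.Dict.counter ((s.toList.drop 0).take t.toList.length))
            (PySem.Dict.counter t.toList)
        · rfl
        · exact absurd ((pyDictEq_counter_iff _ _).1 hcase) hperm0
      rw [if_neg (by rw [hF]; exact Bool.false_ne_true)]
      have hm1 : 1 ≤ t.toList.length := by
        by_contra hcon
        push_neg at hcon
        have ht0 : t.toList = [] := List.length_eq_zero_iff.1 (by omega)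
        exact hperm0 (by simp [ht0])
      rw [Bool.eq_iff_iff, alt_eq]
      have hloop := loop_eq s.toList t.toList t.toList.length rfl hm1
        (s.toList.length - (0 + t.toList.length)) 0
        (PySem.Dict.counter (PySem.List.slice s.toList none (some ((t.toList.length : Nat) : Int))))
        rfl (by omega) (by intro c; rw [hslice])
      simp only [Nat.zero_add] at hloop
      rw [hloop]
      constructor
      · rintro ⟨k, _, hk2, hk3⟩; exact ⟨k, hk2, hk3⟩
      · rintro ⟨k, hk2, hk3⟩
        refine ⟨k, ?_, hk2, hk3⟩
        cases Nat.eq_zero_or_pos k with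
        | inl h => exact absurd (h ▸ hk3) hperm0
        | inr h => exact h
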